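-- pv_equiv track=rewrite | github.com/hackerinheels/multipleMCPServerWithPythonHost | host.py | _extract_tools_from_plan
-- ===== SOURCE A (Python) =====
-- def _extract_tools_from_plan(plan_text, available_functions):
--     """Extract tool names mentioned in a plan text"""
--     tool_names = []
--
--     # Create a mapping of lowercase tool names to actual tool names
--     # This helps with case insensitive matching
--     name_map = {}
--     for func in available_functions:
--         name = func.get('name', '')
--         if name:
--             name_map[name.lower()] = name
--
--             # Also add versions without special characters for fuzzy matching
--             simple_name = ''.join(c for c in name.lower() if c.isalnum() or c == '_')
--             if simple_name and simple_name != name.lower():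
--                 name_map[simple_name] = name
--
--     # Look for tool names in the plan text
--     plan_lower = plan_text.lower()
--     for simple_name, actual_name in name_map.items():
--         if simple_name in plan_lower:
--             if actual_name not in tool_names:
--                 tool_names.append(actual_name)
--
--     return tool_names
-- ===== SOURCE B (Python) =====
-- def _extract_tools_from_plan(plan_text, available_functions):
--     """Extract tool names mentioned in a plan text.
--
--     Single streaming pass over available_functions: each name's two match
--     keys are tested directly against the lowered plan; no name_map dict."""
--     plan_lower = plan_text.lower()
--     tool_names = []
--     for func in available_functions:
--         name = func.get('name', '')
--         if not name:
--             continue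
--         lower = name.lower()
--         simple = ''.join(c for c in lower if c.isalnum() or c == '_')
--         if lower in plan_lower or (simple and simple != lower and simple in plan_lower):
--             if name not in tool_names:
--                 tool_names.append(name)
--     return tool_names
-- ===== Notes on version B (the rewrite author's own statement) =====
-- stated objective: simpler
-- what changed: B streams once over available_functions, testing each name's lowered and symbol-stripped keys directly against the lowered plan, instead of first building a name_map dict and then iterating its items; Pre_ excludes inputs where two entries with different names collide on a lookup key, where A's output is an accident of dict overwrite/reinsertion order.
-- outside the precondition, e.g. on _extract_tools_from_plan('ab', [{'name': 'AB'}, {'name': 'aB'}]): A returns ['aB'], B returns ['AB', 'aB']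
import Mathlib
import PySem

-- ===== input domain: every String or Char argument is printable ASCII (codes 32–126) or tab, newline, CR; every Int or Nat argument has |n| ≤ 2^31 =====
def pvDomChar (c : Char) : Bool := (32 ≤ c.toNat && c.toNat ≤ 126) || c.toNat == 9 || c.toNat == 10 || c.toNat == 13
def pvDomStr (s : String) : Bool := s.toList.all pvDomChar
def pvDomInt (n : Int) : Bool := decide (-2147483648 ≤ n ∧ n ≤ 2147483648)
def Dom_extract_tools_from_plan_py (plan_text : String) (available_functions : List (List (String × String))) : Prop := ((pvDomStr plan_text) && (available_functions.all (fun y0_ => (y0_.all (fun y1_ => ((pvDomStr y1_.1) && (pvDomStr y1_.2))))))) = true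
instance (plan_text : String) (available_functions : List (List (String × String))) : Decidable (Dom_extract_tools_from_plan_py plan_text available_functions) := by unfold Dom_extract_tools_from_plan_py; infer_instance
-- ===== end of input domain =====

-- B streams once over available_functions testing each name's two keys directly against the
-- lowered plan, instead of building a name_map dict and then iterating its items (objective: simpler).

-- shared helpers: both Pythons contain literally `func.get('name', '')` and the same comprehension
def pvGetName (func : List (String × String)) : String :=
  (PySem.Dict.ofList func).getD "name" ""

-- ''.join(c for c in lo if c.isalnum() or c == '_') : a join of single chars is the filtered char list
def pvSimple (lo : String) : String :=
  String.ofList (lo.toList.filter (fun c => PySem.Chars.isalnum c || c == '_'))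

-- ===== PORT A =====
def extract_tools_from_plan_py (plan_text : String) (available_functions : List (List (String × String))) : List String :=
  let name_map : PySem.Dict String String :=
    available_functions.foldl (fun m func =>
      let name := pvGetName func
      if name ≠ "" then
        let m1 := m.insert (PySem.Str.lower name) name
        let simple_name := pvSimple (PySem.Str.lower name)
        if simple_name ≠ "" ∧ simple_name ≠ PySem.Str.lower name then m1.insert simple_name name
        else m1
      else m) PySem.Dict.empty
  let plan_lower := PySem.Str.lower plan_text
  name_map.items.foldl (fun tool_names p =>
    if PySem.Str.isIn p.1 plan_lower = true then
      (if tool_names.contains p.2 then tool_names else tool_names ++ [p.2])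
    else tool_names) []

-- ===== PORT B =====
def extract_tools_from_plan_py_alt (plan_text : String) (available_functions : List (List (String × String))) : List String :=
  let plan_lower := PySem.Str.lower plan_text
  available_functions.foldl (fun tool_names func =>
    let name := pvGetName func
    if name = "" then tool_names
    else
      let lower := PySem.Str.lower name
      let simple := pvSimple lower
      if PySem.Str.isIn lower plan_lower = true ∨
         (simple ≠ "" ∧ simple ≠ lower ∧ PySem.Str.isIn simple plan_lower = true) then
        (if tool_names.contains name then tool_names else tool_names ++ [name])
      else tool_names) []

-- ===== PRECONDITION & SPEC =====
-- the (key, name) pairs a function contributes to A's name_map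
def pvKeysOf (func : List (String × String)) : List (String × String) :=
  let name := pvGetName func
  if name = "" then []
  else
    let lo := PySem.Str.lower name
    let si := pvSimple lo
    (lo, name) :: (if si ≠ "" ∧ si ≠ lo then [(si, name)] else [])

-- Pre_ excludes inputs where two entries with DIFFERENT names collide on a lookup key (case-folding
-- or symbol-stripping collision): which name A keeps there, and in which position, is an accident of
-- dict overwrite/reinsertion order.
def Pre_extract_tools_from_plan_py (plan_text : String) (available_functions : List (List (String × String))) : Prop :=
  (available_functions.flatMap pvKeysOf).Pairwise (fun p q => p.1 = q.1 → p.2 = q.2)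
instance (plan_text : String) (available_functions : List (List (String × String))) : Decidable (Pre_extract_tools_from_plan_py plan_text available_functions) := by unfold Pre_extract_tools_from_plan_py; infer_instance

def pvWitness_extract_tools_from_plan_py : String × (List (List (String × String))) :=
  ("use Add-X now", [[("name", "Add-X")], [("name", "foo")], [("desc", "d")]])

def Spec_extract_tools_from_plan_py (plan_text : String) (available_functions : List (List (String × String))) (out : List String) : Prop := out = extract_tools_from_plan_py_alt plan_text available_functions
instance (plan_text : String) (available_functions : List (List (String × String))) (out : List String) : Decidable (Spec_extract_tools_from_plan_py plan_text available_functions out) := by unfold Spec_extract_tools_from_plan_py; infer_instance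

-- ===== CLAIM (what is proved, stated in full; the proofs are below) =====
def Claim_equal_extract_tools_from_plan_py : Prop := ∀ (plan_text : String) (available_functions : List (List (String × String))), Dom_extract_tools_from_plan_py plan_text available_functions → Pre_extract_tools_from_plan_py plan_text available_functions → Spec_extract_tools_from_plan_py plan_text available_functions (extract_tools_from_plan_py plan_text available_functions)

-- ===== LEMMAS AND PROOFS =====

-- A's inner loop over name_map.items
def pvStep (plan : String) (acc : List String) (p : String × String) : List String :=
  if PySem.Str.isIn p.1 plan = true then (if acc.contains p.2 then acc else acc ++ [p.2]) else acc

-- dedup-append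
def pvDD (acc : List String) (n : String) : List String :=
  if acc.contains n then acc else acc ++ [n]

-- B's loop body
def pvBStep (plan : String) (acc : List String) (func : List (String × String)) : List String :=
  let name := pvGetName func
  if name = "" then acc
  else
    let lower := PySem.Str.lower name
    let simple := pvSimple lower
    if PySem.Str.isIn lower plan = true ∨
       (simple ≠ "" ∧ simple ≠ lower ∧ PySem.Str.isIn simple plan = true) then pvDD acc name
    else acc

def pvBuild (ps : List (String × String)) : PySem.Dict String String :=
  ps.foldl (fun d p => d.insert p.1 p.2) PySem.Dict.empty

lemma pvA_eq (plan : String) (funcs : List (List (String × String))) :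
    extract_tools_from_plan_py plan funcs
      = (pvBuild (funcs.flatMap pvKeysOf)).items.foldl (pvStep (PySem.Str.lower plan)) [] := by
  have build : ∀ (fs : List (List (String × String))) (d : PySem.Dict String String),
      fs.foldl (fun m func =>
        let name := pvGetName func
        if name ≠ "" then
          let m1 := m.insert (PySem.Str.lower name) name
          let simple_name := pvSimple (PySem.Str.lower name)
          if simple_name ≠ "" ∧ simple_name ≠ PySem.Str.lower name then m1.insert simple_name name
          else m1
        else m) d
      = (fs.flatMap pvKeysOf).foldl (fun d p => d.insert p.1 p.2) d := by
    intro fs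
    induction fs with
    | nil => intro d; rfl
    | cons f fs ih =>
      intro d
      simp only [List.foldl_cons, List.flatMap_cons, List.foldl_append, ih]
      congr 1
      simp only [pvKeysOf]
      by_cases h : pvGetName f = ""
      · simp [h]
      · by_cases h2 : pvSimple (PySem.Str.lower (pvGetName f)) ≠ "" ∧
            pvSimple (PySem.Str.lower (pvGetName f)) ≠ PySem.Str.lower (pvGetName f) <;>
          simp [h, h2]
  simp only [extract_tools_from_plan_py, build, pvBuild]
  rfl

lemma pvB_eq (plan : String) (funcs : List (List (String × String))) :
    extract_tools_from_plan_py_alt plan funcs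
      = funcs.foldl (pvBStep (PySem.Str.lower plan)) [] := rfl

lemma pvStep_sub (plan : String) (acc : List String) (p : String × String) (a : String)
    (ha : a ∈ acc) : a ∈ pvStep plan acc p := by
  simp only [pvStep]; split_ifs <;> simp [ha]

lemma pvStep_mono (plan : String) (l : List (String × String)) (acc : List String) (a : String)
    (ha : a ∈ acc) : a ∈ l.foldl (pvStep plan) acc := by
  induction l generalizing acc with
  | nil => exact ha
  | cons p l ih => exact ih _ (pvStep_sub plan acc p a ha)

lemma pvStep_mem (plan : String) (l : List (String × String)) (acc : List String)
    (p : String × String) (hp : p ∈ l) (hm : PySem.Str.isIn p.1 plan = true) :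
    p.2 ∈ l.foldl (pvStep plan) acc := by
  induction l generalizing acc with
  | nil => cases hp
  | cons q l ih =>
    rw [List.foldl_cons]
    rcases List.mem_cons.mp hp with h | hp'
    · subst h
      apply pvStep_mono
      simp only [pvStep]
      rw [if_pos hm]
      split_ifs with h2
      · simpa using h2
      · simp
    · exact ih _ hp'

lemma pvMem_dd (acc : List String) (n : String) : n ∈ pvDD acc n := by
  simp only [pvDD]; split_ifs with h
  · simpa using h
  · simp

lemma pvDD_of_mem (acc : List String) (n : String) (h : n ∈ acc) : pvDD acc n = acc := by
  simp [pvDD, h]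

lemma pvDD_sub (acc : List String) (n a : String) (h : a ∈ acc) : a ∈ pvDD acc n := by
  simp only [pvDD]; split_ifs <;> simp [h]

-- contains ↔ an item with that key exists
lemma pvContains_iff (d : PySem.Dict String String) (k : String) :
    d.contains k = true ↔ ∃ v, (k, v) ∈ d.items := by
  rw [PySem.Dict.contains_iff_mem_keys]
  simp only [PySem.Dict.keys, List.mem_map]
  constructor
  · rintro ⟨p, hp, rfl⟩; exact ⟨p.2, hp⟩
  · rintro ⟨v, hv⟩; exact ⟨(k, v), hv, rfl⟩

-- inserting a pair whose key, wherever it already occurs, carries the same value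
lemma pvItems_insert (d : PySem.Dict String String) (k n : String)
    (h : ∀ q ∈ d.items, q.1 = k → q.2 = n) :
    (d.insert k n).items = if d.contains k then d.items else d.items ++ [(k, n)] := by
  rw [PySem.Dict.items_insert]
  split_ifs with hc
  · rw [show d.items.map (fun p => if p.1 == k then (k, n) else p) = d.items.map id from ?_,
      List.map_id]
    apply List.map_congr_left
    intro q hq
    by_cases hk : q.1 = k
    · obtain ⟨a, b⟩ := q
      simp only at hk
      subst hk
      have hb : b = n := h (a, b) hq rfl
      subst hb
      simp
    · simp [hk]
  · rfl

-- every item of the built dict is one of the inserted pairs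
lemma pvBuild_sub (ps : List (String × String)) : ∀ p ∈ (pvBuild ps).items, p ∈ ps := by
  induction ps using List.reverseRecOn with
  | nil => intro p hp; simp [pvBuild, PySem.Dict.empty] at hp
  | append_singleton l q ih =>
    have : pvBuild (l ++ [q]) = (pvBuild l).insert q.1 q.2 := by
      simp [pvBuild, List.foldl_append]
    rw [this]
    intro p hp
    rcases (PySem.Dict.mem_items_insert _ _ _ _).mp hp with rfl | ⟨hp', _⟩
    · simp
    · exact List.mem_append_left _ (ih p hp')

-- folding pvStep over one optional fresh pair
lemma pvStepOpt (plan : String) (out : List String) (k n : String) (c : Bool)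
    (habs : c = true → PySem.Str.isIn k plan = true → n ∈ out) :
    (if c then ([] : List (String × String)) else [(k, n)]).foldl (pvStep plan) out
      = if PySem.Str.isIn k plan = true then pvDD out n else out := by
  cases c with
  | true =>
    rw [if_pos rfl]
    simp only [List.foldl_nil]
    split_ifs with hm
    · exact (pvDD_of_mem out n (habs rfl hm)).symm
    · rfl
  | false =>
    rw [if_neg (by simp)]
    simp only [List.foldl_cons, List.foldl_nil, pvStep, pvDD]

lemma pvIf_append (d : PySem.Dict String String) (c : Bool) (x : String × String) :
    (if c then d.items else d.items ++ [x])
      = d.items ++ (if c then [] else [x]) := by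
  cases c <;> simp

-- the main induction, from the right over the functions list
lemma pvMain (plan : String) (funcs : List (List (String × String)))
    (hfun : (funcs.flatMap pvKeysOf).Pairwise (fun p q => p.1 = q.1 → p.2 = q.2)) :
    (pvBuild (funcs.flatMap pvKeysOf)).items.foldl (pvStep plan) []
      = funcs.foldl (pvBStep plan) [] := by
  induction funcs using List.reverseRecOn with
  | nil => rfl
  | append_singleton fs f ih =>
    have hsplit : (fs ++ [f]).flatMap pvKeysOf = fs.flatMap pvKeysOf ++ pvKeysOf f := by simp
    rw [hsplit] at hfun ⊢
    have hfun' : (fs.flatMap pvKeysOf).Pairwise (fun p q => p.1 = q.1 → p.2 = q.2) :=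
      (List.pairwise_append.mp hfun).1
    have hcross : ∀ p ∈ fs.flatMap pvKeysOf, ∀ q ∈ pvKeysOf f, p.1 = q.1 → p.2 = q.2 :=
      (List.pairwise_append.mp hfun).2.2
    have iheq := ih hfun'
    set d := pvBuild (fs.flatMap pvKeysOf) with hd
    set out := d.items.foldl (pvStep plan) [] with hout
    have hbuild : pvBuild (fs.flatMap pvKeysOf ++ pvKeysOf f)
        = (pvKeysOf f).foldl (fun d p => d.insert p.1 p.2) d := by
      simp [pvBuild, List.foldl_append, hd]
    have habs : ∀ k n, (∀ q ∈ d.items, q.1 = k → q.2 = n) → d.contains k = true →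
        PySem.Str.isIn k plan = true → n ∈ out := by
      intro k n hval hc hm
      obtain ⟨v, hv⟩ := (pvContains_iff d k).mp hc
      have hvn : v = n := hval (k, v) hv rfl
      subst hvn
      exact pvStep_mem plan d.items [] (k, v) hv hm
    rw [hbuild, List.foldl_append, ← iheq]
    simp only [List.foldl_cons, List.foldl_nil]
    simp only [pvKeysOf, pvBStep]
    by_cases hname : pvGetName f = ""
    · rw [if_pos hname, if_pos hname]
      simp only [List.foldl_nil]
      exact hout.symm
    · rw [if_neg hname, if_neg hname]
      set name := pvGetName f with hn
      set lo := PySem.Str.lower name with hlo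
      set si := pvSimple lo with hsi
      have hvlo : ∀ q ∈ d.items, q.1 = lo → q.2 = name := by
        intro q hq hqk
        refine hcross q (pvBuild_sub _ q hq) (lo, name) ?_ hqk
        simp [pvKeysOf, ← hn, hname, ← hlo]
      by_cases hcond : si ≠ "" ∧ si ≠ lo
      · -- two keys, lo then si
        have hvsi : ∀ q ∈ d.items, q.1 = si → q.2 = name := by
          intro q hq hqk
          refine hcross q (pvBuild_sub _ q hq) (si, name) ?_ hqk
          simp [pvKeysOf, ← hn, hname, ← hlo, ← hsi, hcond]
        have hvsi' : ∀ q ∈ (d.insert lo name).items, q.1 = si → q.2 = name := by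
          intro q hq hqk
          rcases (PySem.Dict.mem_items_insert _ _ _ _).mp hq with rfl | ⟨hq', _⟩
          · rfl
          · exact hvsi q hq' hqk
        have hcsi : (d.insert lo name).contains si = d.contains si := by
          rw [PySem.Dict.contains_insert]
          have h2 : (si == lo) = false := by simpa using hcond.2
          simp [h2]
        have e1 : (d.insert lo name).items
            = d.items ++ (if d.contains lo then [] else [(lo, name)]) := by
          rw [pvItems_insert d lo name hvlo, pvIf_append]
        have e2 : ((d.insert lo name).insert si name).items
            = (d.insert lo name).items ++ (if d.contains si then [] else [(si, name)]) := by
          rw [pvItems_insert (d.insert lo name) si name hvsi', hcsi, pvIf_append]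
        rw [if_pos hcond]
        simp only [List.foldl_cons, List.foldl_nil]
        rw [e2, e1, List.foldl_append, List.foldl_append, ← hout,
          pvStepOpt plan out lo name (d.contains lo) (habs lo name hvlo)]
        have hmem1 : name ∈ out →
            name ∈ (if PySem.Str.isIn lo plan = true then pvDD out name else out) := by
          intro hmem; split_ifs
          · exact pvDD_sub out name name hmem
          · exact hmem
        rw [pvStepOpt plan _ si name (d.contains si)
          (fun hc hm => hmem1 (habs si name hvsi hc hm))]
        by_cases hmlo : PySem.Str.isIn lo plan = true <;>
          by_cases hmsi : PySem.Str.isIn si plan = true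
        · rw [if_pos hmsi, if_pos hmlo, if_pos (Or.inl hmlo)]
          exact pvDD_of_mem _ name (pvMem_dd out name)
        · rw [if_neg hmsi, if_pos hmlo, if_pos (Or.inl hmlo)]
        · rw [if_pos hmsi, if_neg hmlo, if_pos (Or.inr ⟨hcond.1, hcond.2, hmsi⟩)]
        · rw [if_neg hmsi, if_neg hmlo, if_neg ?_]
          rintro (h | ⟨-, -, h⟩)
          · exact hmlo h
          · exact hmsi h
      · -- single key lo
        have hcond2 : ¬ (si ≠ "" ∧ si ≠ lo ∧ PySem.Str.isIn si plan = true) := by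
          rintro ⟨h1, h2, -⟩; exact hcond ⟨h1, h2⟩
        rw [if_neg hcond]
        simp only [List.foldl_cons, List.foldl_nil]
        have e1 : (d.insert lo name).items
            = d.items ++ (if d.contains lo then [] else [(lo, name)]) := by
          rw [pvItems_insert d lo name hvlo, pvIf_append]
        rw [e1, List.foldl_append, ← hout,
          pvStepOpt plan out lo name (d.contains lo) (habs lo name hvlo)]
        by_cases hmlo : PySem.Str.isIn lo plan = true
        · rw [if_pos hmlo, if_pos (Or.inl hmlo)]
        · rw [if_neg hmlo, if_neg ?_]
          rintro (h | h)
          · exact hmlo h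
          · exact hcond2 h

-- ===== VERDICT (by name: the statement is the Claim_ definition above) =====
theorem extract_tools_from_plan_py_spec : Claim_equal_extract_tools_from_plan_py := by
  intro plan funcs _hdom hpre
  unfold Spec_extract_tools_from_plan_py
  rw [pvA_eq, pvB_eq]
  exact pvMain (PySem.Str.lower plan) funcs hpre
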